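-- pv_equiv track=rewrite | github.com/EgeEken/PBC | PBC2_3.py | get_quadrant_size
-- ===== SOURCE A (Python) =====
-- def get_quadrant_size(height, width, quadrant_bitcount):
--     """FOR DEBUGGING/INFO PURPOSES, NOT USED IN ALGORITHM
--     Calculates the size of the quadrant given image dimensions and quadrant bits."""
--     curr_height, curr_width = height, width
--     vertical = True
--     for _ in range(quadrant_bitcount):
--         if vertical:
--             curr_height //= 2
--         else:
--             curr_width //= 2
--         vertical = not vertical
--     return curr_height, curr_width
-- ===== SOURCE B (Python) =====
-- def get_quadrant_size(height, width, quadrant_bitcount):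
--     """FOR DEBUGGING/INFO PURPOSES, NOT USED IN ALGORITHM
--     Calculates the size of the quadrant given image dimensions and quadrant bits."""
--     n = max(quadrant_bitcount, 0)
--     return height >> ((n + 1) // 2), width >> (n // 2)
-- ===== Notes on version B (the rewrite author's own statement) =====
-- stated objective: faster
-- what changed: Replaced the loop that alternately halves height/width quadrant_bitcount times by a closed form: height is halved ceil(n/2) times and width floor(n/2) times, done in O(1) with arithmetic right shifts (exact floor division by powers of two).
import Mathlib
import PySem

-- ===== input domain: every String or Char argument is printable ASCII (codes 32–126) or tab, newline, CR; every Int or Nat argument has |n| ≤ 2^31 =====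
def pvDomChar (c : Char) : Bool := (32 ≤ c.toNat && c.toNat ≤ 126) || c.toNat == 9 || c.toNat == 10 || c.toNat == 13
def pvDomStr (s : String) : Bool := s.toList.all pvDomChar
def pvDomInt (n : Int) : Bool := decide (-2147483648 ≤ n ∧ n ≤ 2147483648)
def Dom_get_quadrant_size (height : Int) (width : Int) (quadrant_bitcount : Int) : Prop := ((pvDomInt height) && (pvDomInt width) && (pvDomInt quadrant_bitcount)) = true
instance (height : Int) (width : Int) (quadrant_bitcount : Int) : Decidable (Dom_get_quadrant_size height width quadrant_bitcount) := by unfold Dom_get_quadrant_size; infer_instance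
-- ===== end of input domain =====

-- B replaces A's loop (alternately halving height/width quadrant_bitcount times) by an O(1)
-- closed form: arithmetic right shifts by ceil(n/2) and floor(n/2) (objective: faster).


-- ===== PORT A =====
-- the 'for _ in range(quadrant_bitcount)' loop with state (curr_height, curr_width, vertical)
def gqsLoop : Nat → Int → Int → Bool → Int × Int
  | 0, h, w, _ => (h, w)
  | k+1, h, w, vertical =>
    if vertical then gqsLoop k (PySem.Int.floordiv h 2) w (!vertical)
    else gqsLoop k h (PySem.Int.floordiv w 2) (!vertical)

def get_quadrant_size (height : Int) (width : Int) (quadrant_bitcount : Int) : List Int :=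
  let r := gqsLoop quadrant_bitcount.toNat height width true
  [r.1, r.2]

-- ===== PORT B =====
def get_quadrant_size_alt (height : Int) (width : Int) (quadrant_bitcount : Int) : List Int :=
  let n := max quadrant_bitcount 0
  [height >>> (PySem.Int.floordiv (n + 1) 2).toNat, width >>> (PySem.Int.floordiv n 2).toNat]

-- ===== PRECONDITION & SPEC =====
def Spec_get_quadrant_size (height : Int) (width : Int) (quadrant_bitcount : Int) (out : List Int) : Prop := out = get_quadrant_size_alt height width quadrant_bitcount
instance (height : Int) (width : Int) (quadrant_bitcount : Int) (out : List Int) : Decidable (Spec_get_quadrant_size height width quadrant_bitcount out) := by unfold Spec_get_quadrant_size; infer_instance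

-- ===== CLAIM (what is proved, stated in full; the proofs are below) =====
def Claim_equal_get_quadrant_size : Prop := ∀ (height : Int) (width : Int) (quadrant_bitcount : Int), Dom_get_quadrant_size height width quadrant_bitcount → Spec_get_quadrant_size height width quadrant_bitcount (get_quadrant_size height width quadrant_bitcount)

-- ===== LEMMAS AND PROOFS =====
theorem fdiv_fdiv_two (h : Int) (k : Nat) : (PySem.Int.floordiv h 2).fdiv (2 ^ k) = h.fdiv (2 ^ (k + 1)) := by
  simp only [PySem.Int.floordiv]
  rw [Int.fdiv_fdiv_eq_fdiv_mul _ (by positivity) (by positivity), pow_succ, mul_comm]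

theorem gqsLoop_closed : ∀ (n : Nat) (h w : Int),
    gqsLoop n h w true = (h.fdiv (2 ^ ((n + 1) / 2)), w.fdiv (2 ^ (n / 2))) ∧
    gqsLoop n h w false = (h.fdiv (2 ^ (n / 2)), w.fdiv (2 ^ ((n + 1) / 2))) := by
  intro n
  induction n with
  | zero => intro h w; simp [gqsLoop]
  | succ k ih =>
    intro h w
    constructor
    · show gqsLoop k (PySem.Int.floordiv h 2) w false = _
      rw [(ih _ w).2, fdiv_fdiv_two]
      have e1 : k / 2 + 1 = (k + 1 + 1) / 2 := by omega
      rw [e1]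
    · show gqsLoop k h (PySem.Int.floordiv w 2) true = _
      rw [(ih h _).1, fdiv_fdiv_two]
      have e1 : k / 2 + 1 = (k + 1 + 1) / 2 := by omega
      rw [e1]

theorem shiftRight_eq_fdiv (x : Int) (k : Nat) : x >>> k = x.fdiv (2 ^ k) := by
  rw [Int.shiftRight_eq_div_pow, Int.fdiv_eq_ediv_of_nonneg _ (by positivity)]
  norm_num

theorem natCast_fdiv (a b : Nat) : (↑a : Int).fdiv ↑b = ↑(a / b) := by
  rw [Int.fdiv_eq_ediv_of_nonneg _ (by positivity)]
  push_cast; rfl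

-- ===== VERDICT (by name: the statement is the Claim_ definition above) =====
theorem get_quadrant_size_spec : Claim_equal_get_quadrant_size := by
  intro height width q _
  unfold Spec_get_quadrant_size get_quadrant_size get_quadrant_size_alt
  have hmax : max q 0 = (q.toNat : Int) := (Int.toNat_eq_max q).symm
  rw [(gqsLoop_closed q.toNat height width).1]
  simp only [hmax, PySem.Int.floordiv]
  have h1 : ((q.toNat : Int) + 1).fdiv 2 = ((q.toNat + 1) / 2 : Nat) := by
    rw [show ((q.toNat : Int) + 1) = ((q.toNat + 1 : Nat) : Int) by push_cast; ring]
    exact natCast_fdiv _ 2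
  have h2 : ((q.toNat : Int)).fdiv 2 = ((q.toNat / 2 : Nat) : Int) := natCast_fdiv _ 2
  rw [h1, h2, Int.toNat_natCast, Int.toNat_natCast, shiftRight_eq_fdiv, shiftRight_eq_fdiv]
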